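-- pv_equiv track=rewrite | github.com/SachinDurairaj06/CONTENT-VIDEO-GENERATOR | unified_flow/cdk.out/asset.2a0b15aa33b22d535263d7f397a199ca0df72d7ee8acf021e01aa3b32d51eb7e/multi_shot.py | calculate_shots
-- ===== SOURCE A (Python) =====
-- import math
--
-- SHOT_DURATION_SECONDS = 6
--
-- MAX_VIDEO_DURATION_SECONDS = 120
--
-- MAX_SHOTS = MAX_VIDEO_DURATION_SECONDS // SHOT_DURATION_SECONDS  # 20 shots
--
-- def calculate_shots(target_duration_seconds: int, visual_prompts: list) -> list:
--     """
--     Calculate how many 6-second shots are needed and distribute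
--     the visual prompts across them.
--
--     If target_duration > len(visual_prompts) * 6, prompts are cycled.
--     If target_duration < len(visual_prompts) * 6, prompts are truncated.
--
--     Args:
--         target_duration_seconds: Desired total video length (must be multiple of 6, max 120)
--         visual_prompts: List of prompt strings from the manifest
--
--     Returns:
--         List of prompt strings, one per 6-second shot
--     """
--     # Clamp duration
--     target_duration_seconds = min(target_duration_seconds, MAX_VIDEO_DURATION_SECONDS)
--     target_duration_seconds = max(target_duration_seconds, SHOT_DURATION_SECONDS)
--
--     # Round to nearest multiple of 6
--     num_shots = math.ceil(target_duration_seconds / SHOT_DURATION_SECONDS)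
--     num_shots = min(num_shots, MAX_SHOTS)
--
--     if not visual_prompts:
--         return []
--
--     # Distribute prompts across shots (cycle if needed)
--     shot_prompts = []
--     for i in range(num_shots):
--         prompt_idx = i % len(visual_prompts)
--         shot_prompts.append(visual_prompts[prompt_idx])
--
--     return shot_prompts
-- ===== SOURCE B (Python) =====
-- import math
--
-- SHOT_DURATION_SECONDS = 6
-- MAX_VIDEO_DURATION_SECONDS = 120
-- MAX_SHOTS = MAX_VIDEO_DURATION_SECONDS // SHOT_DURATION_SECONDS  # 20 shots
--
--
-- def calculate_shots(target_duration_seconds: int, visual_prompts: list) -> list: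
--     """Tile-then-truncate: replicate the whole prompt list enough times, then slice."""
--     t = max(min(target_duration_seconds, MAX_VIDEO_DURATION_SECONDS), SHOT_DURATION_SECONDS)
--     num_shots = min(-(-t // SHOT_DURATION_SECONDS), MAX_SHOTS)
--     if not visual_prompts:
--         return []
--     reps = -(-num_shots // len(visual_prompts))
--     return (visual_prompts * reps)[:num_shots]
-- ===== Notes on version B (the rewrite author's own statement) =====
-- stated objective: simpler
-- what changed: Replaces the per-shot modulo-indexing loop with whole-list replication (ceil-division repeat count) followed by a single slice; no loop or modulo indexing remains.
import Mathlib
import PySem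

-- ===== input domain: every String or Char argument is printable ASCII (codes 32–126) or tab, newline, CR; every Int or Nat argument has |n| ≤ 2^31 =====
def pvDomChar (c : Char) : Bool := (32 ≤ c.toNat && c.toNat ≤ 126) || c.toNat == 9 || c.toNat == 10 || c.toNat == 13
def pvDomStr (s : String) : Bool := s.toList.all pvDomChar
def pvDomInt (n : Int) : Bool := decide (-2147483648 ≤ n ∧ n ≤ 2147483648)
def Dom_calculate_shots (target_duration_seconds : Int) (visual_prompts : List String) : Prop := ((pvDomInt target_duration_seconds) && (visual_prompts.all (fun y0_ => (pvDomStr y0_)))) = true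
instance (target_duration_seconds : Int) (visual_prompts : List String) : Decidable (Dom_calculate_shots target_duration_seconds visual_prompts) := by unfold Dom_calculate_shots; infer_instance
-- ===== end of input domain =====

-- B replaces A's per-shot modulo-indexing loop with tile-then-truncate (replicate the prompt
-- list ceil(num_shots/len) times, then slice to num_shots); same return value, simpler shape.
-- ===== PORT A =====
-- Port note: math.ceil(t/6) is ported as ceiling division -((-t) // 6); the two are exact
-- for the clamped integer t ∈ [6, 120] that reaches it.
def calculate_shots (target_duration_seconds : Int) (visual_prompts : List String) : List String :=
  let t1 := min target_duration_seconds 120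
  let t2 := max t1 6
  let numShots0 := -(PySem.Int.floordiv (-t2) 6)
  let numShots := min numShots0 20
  if visual_prompts = [] then []
  else
    (PySem.List.pyRange 0 numShots).foldl
      (fun acc i =>
        acc ++ [(PySem.List.pyGet? visual_prompts
                  (PySem.Int.mod i (visual_prompts.length : Int))).getD ""]) []

-- ===== PORT B =====
def calculate_shots_alt (target_duration_seconds : Int) (visual_prompts : List String) : List String :=
  let t := max (min target_duration_seconds 120) 6
  let numShots := min (-(PySem.Int.floordiv (-t) 6)) 20
  if visual_prompts = [] then []
  else
    let reps := -(PySem.Int.floordiv (-numShots) (visual_prompts.length : Int))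
    ((List.replicate reps.toNat visual_prompts).flatten).take numShots.toNat

-- ===== PRECONDITION & SPEC =====
def Spec_calculate_shots (target_duration_seconds : Int) (visual_prompts : List String) (out : List String) : Prop := out = calculate_shots_alt target_duration_seconds visual_prompts
instance (target_duration_seconds : Int) (visual_prompts : List String) (out : List String) : Decidable (Spec_calculate_shots target_duration_seconds visual_prompts out) := by unfold Spec_calculate_shots; infer_instance

-- ===== CLAIM (what is proved, stated in full; the proofs are below) =====
def Claim_equal_calculate_shots : Prop := ∀ (target_duration_seconds : Int) (visual_prompts : List String), Dom_calculate_shots target_duration_seconds visual_prompts → Spec_calculate_shots target_duration_seconds visual_prompts (calculate_shots target_duration_seconds visual_prompts)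

-- ===== LEMMAS AND PROOFS =====

-- element i of r copies of vp, flattened, is vp[i % len(vp)]
lemma flat_rep_get {vp : List String} (hvp : vp ≠ []) :
    ∀ (r i : Nat), i < r * vp.length →
      ((List.replicate r vp).flatten)[i]? = vp[i % vp.length]? := by
  intro r
  induction r with
  | zero => intro i h; omega
  | succ r ih =>
      intro i h
      have hk : 0 < vp.length := List.length_pos_iff.mpr hvp
      rw [Nat.succ_mul] at h
      rw [List.replicate_succ, List.flatten_cons]
      by_cases hi : i < vp.length
      · rw [List.getElem?_append_left hi, Nat.mod_eq_of_lt hi]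
      · push Not at hi
        rw [List.getElem?_append_right hi]
        have h1 : i - vp.length < r * vp.length := by omega
        rw [ih (i - vp.length) h1]
        congr 1
        conv_rhs => rw [show i = (i - vp.length) + vp.length by omega]
        rw [Nat.add_mod_right]

-- A's loop over n shots equals the first n elements of the tiled list, as long as the tile covers
lemma loop_eq_take {vp : List String} (hvp : vp ≠ []) :
    ∀ (n r : Nat), n ≤ r * vp.length →
      (PySem.List.pyRange 0 (n : Int)).foldl
        (fun acc i => acc ++ [(PySem.List.pyGet? vp (PySem.Int.mod i (vp.length : Int))).getD ""]) []
      = ((List.replicate r vp).flatten).take n := by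
  intro n
  induction n with
  | zero => intro r _; simp [PySem.List.pyRange]
  | succ n ih =>
      intro r h
      have hk : 0 < vp.length := List.length_pos_iff.mpr hvp
      have hle : (0 : Int) ≤ (n : Int) := by positivity
      have : ((n + 1 : Nat) : Int) = (n : Int) + 1 := by push_cast; ring
      rw [this, PySem.List.pyRange_one_succ_right hle, List.foldl_append,
          ih r (by omega), List.take_add_one]
      simp only [List.foldl_cons, List.foldl_nil]
      congr 1
      rw [PySem.Int.mod_natCast, PySem.List.pyGet?_natCast,
          flat_rep_get hvp r n (by omega)]
      have hlt : n % vp.length < vp.length := Nat.mod_lt _ hk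
      rw [List.getElem?_eq_getElem hlt]
      simp

-- ===== VERDICT (by name: the statement is the Claim_ definition above) =====
theorem calculate_shots_spec : Claim_equal_calculate_shots := by
  intro t vp _
  unfold Spec_calculate_shots calculate_shots calculate_shots_alt
  by_cases hvp : vp = []
  · simp [hvp]
  · simp only [hvp, if_false]
    set t2 := max (min t 120) 6 with ht2
    have ht2b : 6 ≤ t2 ∧ t2 ≤ 120 := by constructor <;> omega
    -- numShots bounds
    have e6 := PySem.Int.floordiv_mul_add_mod (-t2) 6
    have m6a := PySem.Int.mod_nonneg (-t2) (show (0:Int) < 6 by norm_num)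
    have m6b := PySem.Int.mod_lt (-t2) (show (0:Int) < 6 by norm_num)
    set f6 := PySem.Int.floordiv (-t2) 6 with hf6
    set ns := min (-f6) 20 with hns
    have hns1 : 1 ≤ ns ∧ ns ≤ 20 := by omega
    have hk : 0 < vp.length := List.length_pos_iff.mpr hvp
    have hkInt : (0:Int) < (vp.length : Int) := by exact_mod_cast hk
    -- reps bounds: ns ≤ reps * len
    have ek := PySem.Int.floordiv_mul_add_mod (-ns) (vp.length : Int)
    have mka := PySem.Int.mod_nonneg (-ns) hkInt
    set fk := PySem.Int.floordiv (-ns) (vp.length : Int) with hfk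
    set r := -fk with hr
    have hrk : r * (vp.length : Int) = ns + PySem.Int.mod (-ns) (vp.length : Int) := by
      have hatom : fk * (vp.length : Int) = -ns - PySem.Int.mod (-ns) (vp.length : Int) := by
        linarith
      calc r * (vp.length : Int) = -(fk * (vp.length : Int)) := by rw [hr]; ring
        _ = ns + PySem.Int.mod (-ns) (vp.length : Int) := by rw [hatom]; ring
    have hr0 : 0 ≤ r := by nlinarith
    have hcov : ns.toNat ≤ r.toNat * vp.length := by
      have : (r.toNat * vp.length : Int) = r * (vp.length : Int) := by
        push_cast [Int.toNat_of_nonneg hr0]; ring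
      omega
    have := loop_eq_take hvp ns.toNat r.toNat hcov
    rw [show ((ns.toNat : Nat) : Int) = ns by omega] at this
    exact this
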